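-- pv_equiv track=rewrite | github.com/MHughesDev/trading_bot | data_plane/ingest/kraken_symbols.py | canonical_symbol_from_kraken_pair
-- ===== SOURCE A (Python) =====
-- _KNOWN_WS = {
--     "BTC-USD": "XBT/USD",
--     "ETH-USD": "ETH/USD",
--     "SOL-USD": "SOL/USD",
--     "BTC-USDT": "XBT/USDT",
--     "ETH-USDT": "ETH/USDT",
-- }
--
-- def canonical_symbol_from_kraken_pair(pair: str) -> str:
--     """
--     Inverse of ``kraken_pair_from_symbol`` for WS/REST **pair** strings.
--
--     Kraken messages use ``wsname`` (e.g. ``XBT/USD``); config and QuestDB use ``BTC-USD``.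
--     Unknown pairs fall back to ``BASE-QUOTE`` with ``XBT`` → ``BTC``.
--     """
--     s = pair.strip()
--     for canon, wsname in _KNOWN_WS.items():
--         if wsname == s:
--             return canon
--     if "/" not in s:
--         return s
--     base, quote = s.split("/", 1)
--     if base.upper() == "XBT":
--         base = "BTC"
--     return f"{base.upper()}-{quote.upper()}"
-- ===== SOURCE B (Python) =====
-- def canonical_symbol_from_kraken_pair(pair: str) -> str:
--     s = pair.strip()
--     if "/" not in s:
--         return s
--     base, quote = s.split("/", 1)
--     b = base.upper()
--     return ("BTC" if b == "XBT" else b) + "-" + quote.upper()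
-- ===== Notes on version B (the rewrite author's own statement) =====
-- stated objective: simpler
-- what changed: Dropped the _KNOWN_WS table and its scanning loop entirely: every table entry is reproduced by the general fallback rule (XBT->BTC, uppercase, '-' join), so B is a single direct computation on the split parts.
import Mathlib
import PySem

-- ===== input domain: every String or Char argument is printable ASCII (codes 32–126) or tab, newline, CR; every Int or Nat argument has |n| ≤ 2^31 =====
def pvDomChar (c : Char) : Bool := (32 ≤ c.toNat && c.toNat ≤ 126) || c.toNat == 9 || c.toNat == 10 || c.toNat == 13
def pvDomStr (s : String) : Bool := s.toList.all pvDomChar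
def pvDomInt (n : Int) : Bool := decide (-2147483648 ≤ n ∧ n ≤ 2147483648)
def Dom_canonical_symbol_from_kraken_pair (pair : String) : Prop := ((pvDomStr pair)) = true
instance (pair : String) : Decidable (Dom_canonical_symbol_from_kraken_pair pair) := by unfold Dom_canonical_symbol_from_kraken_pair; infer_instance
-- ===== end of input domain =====

-- B drops A's _KNOWN_WS table scan (each entry is reproduced by the fallback rule) and computes the symbol directly: simpler, same values.


-- ===== PORT A =====
def pvKnownWS : List (String × String) :=
  [("BTC-USD", "XBT/USD"), ("ETH-USD", "ETH/USD"), ("SOL-USD", "SOL/USD"),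
   ("BTC-USDT", "XBT/USDT"), ("ETH-USDT", "ETH/USDT")]

-- the 'for canon, wsname in _KNOWN_WS.items(): if wsname == s: return canon' loop
def pvScan (s : String) : List (String × String) → Option String
  | [] => none
  | (canon, ws) :: rest => if ws = s then some canon else pvScan s rest

def canonical_symbol_from_kraken_pair (pair : String) : String :=
  let s := PySem.Str.strip pair
  match pvScan s pvKnownWS with
  | some canon => canon
  | none =>
    if PySem.Str.isIn "/" s = false then s
    else
      -- base, quote = s.split("/", 1)  (the '_' arm is unreachable: the split has ≥ 2 parts here)
      match (PySem.Str.splitMax? s "/" 1).getD [] with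
      | base :: quote :: _ =>
        let base := if PySem.Str.upper base = "XBT" then "BTC" else base
        String.mk ((PySem.Str.upper base).toList ++ '-' :: (PySem.Str.upper quote).toList)
      | _ => s

-- ===== PORT B =====
def canonical_symbol_from_kraken_pair_alt (pair : String) : String :=
  let s := PySem.Str.strip pair
  if PySem.Str.isIn "/" s then
    match (PySem.Str.splitMax? s "/" 1).getD [] with
    | [] => s
    | base :: rest =>
      match rest with
      | [] => s
      | quote :: _ =>
        let b := PySem.Str.upper base
        String.mk ((if b = "XBT" then "BTC" else b).toList ++ '-' :: (PySem.Str.upper quote).toList)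
  else s

-- ===== PRECONDITION & SPEC =====
def Spec_canonical_symbol_from_kraken_pair (pair : String) (out : String) : Prop := out = canonical_symbol_from_kraken_pair_alt pair
instance (pair : String) (out : String) : Decidable (Spec_canonical_symbol_from_kraken_pair pair out) := by unfold Spec_canonical_symbol_from_kraken_pair; infer_instance

-- ===== CLAIM (what is proved, stated in full; the proofs are below) =====
def Claim_equal_canonical_symbol_from_kraken_pair : Prop := ∀ (pair : String), Dom_canonical_symbol_from_kraken_pair pair → Spec_canonical_symbol_from_kraken_pair pair (canonical_symbol_from_kraken_pair pair)

-- ===== LEMMAS AND PROOFS =====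

-- A's table scan hits only on the five literal wsnames, returning the paired canon.
theorem pvScan_cases (s c : String) (h : pvScan s pvKnownWS = some c) :
    (s = "XBT/USD" ∧ c = "BTC-USD") ∨ (s = "ETH/USD" ∧ c = "ETH-USD") ∨
    (s = "SOL/USD" ∧ c = "SOL-USD") ∨ (s = "XBT/USDT" ∧ c = "BTC-USDT") ∨
    (s = "ETH/USDT" ∧ c = "ETH-USDT") := by
  simp only [pvKnownWS, pvScan] at h
  split_ifs at h with h1 h2 h3 h4 h5 <;> simp_all

-- ===== VERDICT (by name: the statement is the Claim_ definition above) =====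
theorem canonical_symbol_from_kraken_pair_spec : Claim_equal_canonical_symbol_from_kraken_pair := by
  intro pair _
  unfold Spec_canonical_symbol_from_kraken_pair
  unfold canonical_symbol_from_kraken_pair canonical_symbol_from_kraken_pair_alt
  generalize PySem.Str.strip pair = s
  cases hscan : pvScan s pvKnownWS with
  | some c =>
    rcases pvScan_cases s c hscan with ⟨hs, hc⟩ | ⟨hs, hc⟩ | ⟨hs, hc⟩ | ⟨hs, hc⟩ | ⟨hs, hc⟩ <;>
      subst hs <;> subst hc <;> decide
  | none =>
    simp only [hscan]
    by_cases hin : PySem.Str.isIn "/" s = true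
    · simp only [hin, Bool.true_eq_false, if_false, if_true]
      cases hsp : (PySem.Str.splitMax? s "/" 1).getD [] with
      | nil => rfl
      | cons base rest =>
        cases rest with
        | nil => rfl
        | cons quote rest' =>
          by_cases hb : PySem.Str.upper base = "XBT"
          · simp only [hb, if_true]; rfl
          · simp [hb]
    · simp only [Bool.not_eq_true] at hin
      have h2 : PySem.Chars.isIn ['/'] s.toList = false := by simpa using hin
      simp [h2]
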